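-- pv_equiv track=rewrite | github.com/mjcraighead/pythonj | pythonj_runtime.py | _pyj_format_zero_fill_grouped
-- ===== SOURCE A (Python) =====
-- def _pyj_format_group_digits(digits: str, grouping, group_size: int) -> str:
--     if grouping is None:
--         return digits
--     parts = []
--     grouping_str: str = grouping
--     i = len(digits)
--     while i > group_size:
--         parts.append(digits[i - group_size:i])
--         i -= group_size
--     parts.append(digits[:i])
--     parts.reverse()
--     return grouping_str.join(parts)
--
-- def _pyj_format_zero_fill_grouped(sign: str, prefix: str, digits: str, grouping, group_size: int, suffix: str, width: int) -> str:
--     if grouping is None: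
--         return sign + prefix + ('0' * (width - len(sign) - len(prefix) - len(digits) - len(suffix))) + digits + suffix
--
--     digits_len: int = len(digits)
--     total_len = len(sign) + len(prefix) + digits_len + ((digits_len - 1) // group_size) + len(suffix)
--     while total_len < width:
--         digits_len += 1
--         total_len = len(sign) + len(prefix) + digits_len + ((digits_len - 1) // group_size) + len(suffix)
--     if digits_len > len(digits):
--         digits = ('0' * (digits_len - len(digits))) + digits
--     return sign + prefix + _pyj_format_group_digits(digits, grouping, group_size) + suffix
-- ===== SOURCE B (Python) =====
-- def _pyj_format_zero_fill_grouped(sign: str, prefix: str, digits: str, grouping, group_size: int, suffix: str, width: int) -> str: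
--     if grouping is None:
--         return sign + prefix + ('0' * (width - len(sign) - len(prefix) - len(digits) - len(suffix))) + digits + suffix
--     # solve for the needed digit count directly: smallest d with
--     # base + d + (d-1)//group_size >= width, clamped below by len(digits)
--     w = width - len(sign) - len(prefix) - len(suffix)
--     d = max(len(digits), w - (w - 1) // (group_size + 1))
--     padded = digits.rjust(d, '0')
--     head = (d - 1) % group_size + 1 if d else 0
--     parts = [padded[:head]]
--     parts.extend(padded[i:i + group_size] for i in range(head, d, group_size))
--     return sign + prefix + grouping.join(parts) + suffix
-- ===== Notes on version B (the rewrite author's own statement) =====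
-- stated objective: alternative
-- what changed: B replaces A's increment-by-one search for the padded digit count with a closed-form floor-division formula (d = max(len(digits), w - (w-1)//(group_size+1))) and builds the groups front-to-back by slicing from a computed first-group size, instead of A's back-to-front while loop plus reverse.
import Mathlib
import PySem

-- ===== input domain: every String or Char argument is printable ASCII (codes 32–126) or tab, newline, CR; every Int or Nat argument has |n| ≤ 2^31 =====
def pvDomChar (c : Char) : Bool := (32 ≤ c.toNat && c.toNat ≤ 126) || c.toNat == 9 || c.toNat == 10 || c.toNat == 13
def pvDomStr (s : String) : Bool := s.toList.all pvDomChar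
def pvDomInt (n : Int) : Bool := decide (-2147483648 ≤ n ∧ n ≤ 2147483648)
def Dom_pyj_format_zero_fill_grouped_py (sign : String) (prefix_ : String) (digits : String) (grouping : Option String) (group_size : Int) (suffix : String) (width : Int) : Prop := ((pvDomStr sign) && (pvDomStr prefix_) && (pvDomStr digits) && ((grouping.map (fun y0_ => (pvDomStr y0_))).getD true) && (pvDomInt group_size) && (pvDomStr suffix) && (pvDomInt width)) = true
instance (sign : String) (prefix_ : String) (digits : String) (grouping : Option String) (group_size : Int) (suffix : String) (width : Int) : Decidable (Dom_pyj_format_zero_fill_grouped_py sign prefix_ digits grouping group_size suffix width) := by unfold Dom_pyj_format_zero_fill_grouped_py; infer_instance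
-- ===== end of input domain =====

-- B computes the padded digit count by a closed-form floor-division formula and slices the
-- groups front-to-back, instead of A's increment-by-one width search and back-to-front loop.


-- ===== PORT A =====
-- the while-loop of _pyj_format_group_digits: collect group_size-sized chunks back to front.
-- The '1 ≤ g' conjunct of the guard only makes the recursion total: Python diverges for
-- group_size ≤ 0 here (excluded by Pre_), and never reaches this loop with group_size ≤ 0 inside Pre_.
def pyjGroupLoopA (s : List Char) (g : Int) (i : Int) (parts : List (List Char)) : List (List Char) :=
  if _h : 1 ≤ g ∧ g < i then
    pyjGroupLoopA s g (i - g) (parts ++ [PySem.List.slice s (some (i - g)) (some i)])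
  else
    parts ++ [PySem.List.slice s none (some i)]
termination_by i.toNat
decreasing_by omega

-- _pyj_format_group_digits
def pyjGroupDigitsA (digits : List Char) (grouping : Option String) (group_size : Int) : List Char :=
  match grouping with
  | none => digits
  | some grouping_str =>
      PySem.Chars.join grouping_str.toList
        ((pyjGroupLoopA digits group_size (digits.length : Int) []).reverse)

-- the 'while total_len < width' loop of A: increment digits_len until the total reaches width.
-- The '1 ≤ g ∧ 0 ≤ d' conjuncts of the guard only make the recursion total: Python diverges for
-- group_size ≤ 0 (excluded by Pre_), and d = len(digits) ≥ 0 always holds at the call site.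
def pyjFillLoopA (ls lp lsuf g width d : Int) : Int :=
  if _h : 1 ≤ g ∧ 0 ≤ d ∧ ls + lp + d + PySem.Int.floordiv (d - 1) g + lsuf < width then
    pyjFillLoopA ls lp lsuf g width (d + 1)
  else d
termination_by (width - (ls + lp + lsuf) - d + 1).toNat
decreasing_by
  have hfd : -1 ≤ PySem.Int.floordiv (d - 1) g := by
    rw [PySem.Int.le_floordiv_iff_mul_le (by omega)]; omega
  omega

def pyj_format_zero_fill_grouped_py (sign : String) (prefix_ : String) (digits : String) (grouping : Option String) (group_size : Int) (suffix : String) (width : Int) : String :=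
  match grouping with
  | none =>
      String.ofList (sign.toList ++ prefix_.toList ++
        PySem.List.pyRepeat ['0']
          (width - PySem.Str.len sign - PySem.Str.len prefix_ - PySem.Str.len digits - PySem.Str.len suffix) ++
        digits.toList ++ suffix.toList)
  | some _ =>
      let digits_len0 : Int := PySem.Str.len digits
      let digits_len : Int :=
        pyjFillLoopA (PySem.Str.len sign) (PySem.Str.len prefix_) (PySem.Str.len suffix)
          group_size width digits_len0
      let digits' : List Char :=
        if digits_len0 < digits_len then
          PySem.List.pyRepeat ['0'] (digits_len - digits_len0) ++ digits.toList
        else digits.toList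
      String.ofList (sign.toList ++ prefix_.toList ++
        pyjGroupDigitsA digits' grouping group_size ++ suffix.toList)

-- ===== PORT B =====
def pyj_format_zero_fill_grouped_py_alt (sign : String) (prefix_ : String) (digits : String) (grouping : Option String) (group_size : Int) (suffix : String) (width : Int) : String :=
  match grouping with
  | none =>
      String.ofList (sign.toList ++ prefix_.toList ++
        PySem.List.pyRepeat ['0']
          (width - PySem.Str.len sign - PySem.Str.len prefix_ - PySem.Str.len digits - PySem.Str.len suffix) ++
        digits.toList ++ suffix.toList)
  | some gstr =>
      let w : Int := width - PySem.Str.len sign - PySem.Str.len prefix_ - PySem.Str.len suffix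
      let d : Int := max (PySem.Str.len digits) (w - PySem.Int.floordiv (w - 1) (group_size + 1))
      -- digits.rjust(d, '0'), ported by hand: left-pad with '0' up to length d (exact: Python pads by max(0, d - len))
      let padded : List Char := List.replicate (d.toNat - digits.toList.length) '0' ++ digits.toList
      let head : Int := if d ≠ 0 then PySem.Int.mod (d - 1) group_size + 1 else 0
      let parts : List (List Char) :=
        PySem.List.slice padded none (some head) ::
          (PySem.List.pyRange head d group_size).map
            (fun i => PySem.List.slice padded (some i) (some (i + group_size)))
      String.ofList (sign.toList ++ prefix_.toList ++
        PySem.Chars.join gstr.toList parts ++ suffix.toList)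

-- ===== PRECONDITION & SPEC =====
-- Pre_ excludes exactly the inputs on which A never returns: with grouping ≠ None and
-- group_size = 0 A raises ZeroDivisionError, and with group_size < 0 A loops forever.
def Pre_pyj_format_zero_fill_grouped_py (sign : String) (prefix_ : String) (digits : String) (grouping : Option String) (group_size : Int) (suffix : String) (width : Int) : Prop :=
  grouping = none ∨ 1 ≤ group_size
instance (sign : String) (prefix_ : String) (digits : String) (grouping : Option String) (group_size : Int) (suffix : String) (width : Int) : Decidable (Pre_pyj_format_zero_fill_grouped_py sign prefix_ digits grouping group_size suffix width) := by unfold Pre_pyj_format_zero_fill_grouped_py; infer_instance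

def pvWitness_pyj_format_zero_fill_grouped_py : String × String × String × Option String × Int × String × Int :=
  ("-", "", "1234", some ",", 3, "", 12)

def Spec_pyj_format_zero_fill_grouped_py (sign : String) (prefix_ : String) (digits : String) (grouping : Option String) (group_size : Int) (suffix : String) (width : Int) (out : String) : Prop := out = pyj_format_zero_fill_grouped_py_alt sign prefix_ digits grouping group_size suffix width
instance (sign : String) (prefix_ : String) (digits : String) (grouping : Option String) (group_size : Int) (suffix : String) (width : Int) (out : String) : Decidable (Spec_pyj_format_zero_fill_grouped_py sign prefix_ digits grouping group_size suffix width out) := by unfold Spec_pyj_format_zero_fill_grouped_py; infer_instance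

-- ===== CLAIM (what is proved, stated in full; the proofs are below) =====
def Claim_equal_pyj_format_zero_fill_grouped_py : Prop := ∀ (sign : String) (prefix_ : String) (digits : String) (grouping : Option String) (group_size : Int) (suffix : String) (width : Int), Dom_pyj_format_zero_fill_grouped_py sign prefix_ digits grouping group_size suffix width → Pre_pyj_format_zero_fill_grouped_py sign prefix_ digits grouping group_size suffix width → Spec_pyj_format_zero_fill_grouped_py sign prefix_ digits grouping group_size suffix width (pyj_format_zero_fill_grouped_py sign prefix_ digits grouping group_size suffix width)

-- ===== LEMMAS AND PROOFS =====

-- the step function d ↦ d + (d-1)//g reaches w exactly when d reaches the closed form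
-- w - (w-1)//(g+1) that B computes.

lemma pyjFillCount_iff (g w d : Int) (hg : 1 ≤ g) (_hd : 0 ≤ d) :
    w ≤ d + PySem.Int.floordiv (d - 1) g ↔
      w - PySem.Int.floordiv (w - 1) (g + 1) ≤ d := by
  obtain ⟨q, hqdef⟩ : ∃ q, PySem.Int.floordiv (d - 1) g = q := ⟨_, rfl⟩
  obtain ⟨r, hrdef⟩ : ∃ r, PySem.Int.mod (d - 1) g = r := ⟨_, rfl⟩
  obtain ⟨Q, hQdef⟩ : ∃ Q, PySem.Int.floordiv (w - 1) (g + 1) = Q := ⟨_, rfl⟩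
  obtain ⟨R, hRdef⟩ : ∃ R, PySem.Int.mod (w - 1) (g + 1) = R := ⟨_, rfl⟩
  have hq : q * g + r = d - 1 := by rw [← hqdef, ← hrdef]; exact PySem.Int.floordiv_mul_add_mod _ _
  have hr0 : 0 ≤ r := hrdef ▸ PySem.Int.mod_nonneg _ (by omega)
  have hrg : r < g := hrdef ▸ PySem.Int.mod_lt _ (by omega)
  have hQ : Q * (g + 1) + R = w - 1 := by rw [← hQdef, ← hRdef]; exact PySem.Int.floordiv_mul_add_mod _ _
  have hR0 : 0 ≤ R := hRdef ▸ PySem.Int.mod_nonneg _ (by omega)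
  have hRg : R < g + 1 := hRdef ▸ PySem.Int.mod_lt _ (by omega)
  have hqe : q * (g + 1) = q * g + q := by ring
  have hQe : Q * (g + 1) = Q * g + Q := by ring
  rw [hqdef, hQdef]
  constructor
  · intro h
    have hkey : PySem.Int.floordiv (d + q - 1) (g + 1) = q := by
      rw [PySem.Int.floordiv_eq_iff_of_pos (by omega)]
      constructor
      · nlinarith
      · nlinarith
    have ht0 : 0 ≤ d + q - w := by omega
    have hmul : d + q - w ≤ (d + q - w) * (g + 1) := le_mul_of_one_le_right ht0 (by omega)
    have h1 : PySem.Int.floordiv (d + q - 1) (g + 1) ≤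
        PySem.Int.floordiv (w - 1 + (d + q - w) * (g + 1)) (g + 1) := by
      rw [PySem.Int.floordiv_eq_ediv_of_pos (by omega), PySem.Int.floordiv_eq_ediv_of_pos (by omega)]
      exact Int.ediv_le_ediv (by omega) (by omega)
    have h2 : PySem.Int.floordiv (w - 1 + (d + q - w) * (g + 1)) (g + 1) = Q + (d + q - w) := by
      rw [PySem.Int.floordiv_eq_ediv_of_pos (by omega)]
      rw [Int.add_mul_ediv_right _ _ (by omega : (g + 1) ≠ 0)]
      rw [← PySem.Int.floordiv_eq_ediv_of_pos (by omega : (0:Int) < g + 1), hQdef]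
    omega
  · intro h
    have h1 : Q ≤ q := by
      have ha : Q ≤ PySem.Int.floordiv (Q * g + R) g := by
        rw [PySem.Int.le_floordiv_iff_mul_le (by omega)]; omega
      have hb : PySem.Int.floordiv (Q * g + R) g ≤ q := by
        rw [← hqdef, PySem.Int.floordiv_eq_ediv_of_pos (by omega),
          PySem.Int.floordiv_eq_ediv_of_pos (by omega)]
        exact Int.ediv_le_ediv (by omega) (by omega)
      omega
    omega

-- A's fill loop equals the maximum of its start value and B's closed form.
lemma pyjFillLoopA_eq (N : Nat) : ∀ (ls lp lsuf g width d : Int),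
    (width - (ls + lp + lsuf) - d + 1).toNat ≤ N → 1 ≤ g → 0 ≤ d →
    pyjFillLoopA ls lp lsuf g width d =
      max d ((width - ls - lp - lsuf) -
        PySem.Int.floordiv ((width - ls - lp - lsuf) - 1) (g + 1)) := by
  induction N with
  | zero =>
      intro ls lp lsuf g width d hN hg hd
      have hfd : -1 ≤ PySem.Int.floordiv (d - 1) g := by
        rw [PySem.Int.le_floordiv_iff_mul_le (by omega)]; omega
      rw [pyjFillLoopA]
      rw [dif_neg (by omega)]
      have := (pyjFillCount_iff g (width - ls - lp - lsuf) d hg hd).mp (by omega)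
      omega
  | succ n ih =>
      intro ls lp lsuf g width d hN hg hd
      have hfd : -1 ≤ PySem.Int.floordiv (d - 1) g := by
        rw [PySem.Int.le_floordiv_iff_mul_le (by omega)]; omega
      rw [pyjFillLoopA]
      split_ifs with h
      · have hrec := ih ls lp lsuf g width (d + 1) (by omega) hg (by omega)
        rw [hrec]
        have hlt := (pyjFillCount_iff g (width - ls - lp - lsuf) d hg hd).not.mp (by omega)
        omega
      · have := (pyjFillCount_iff g (width - ls - lp - lsuf) d hg hd).mp (by omega)
        omega

-- the accumulator of A's grouping loop is a prefix of the result.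
lemma pyjGroupLoopA_acc (s : List Char) (g : Int) (N : Nat) :
    ∀ (i : Int) (parts : List (List Char)), i.toNat ≤ N →
    pyjGroupLoopA s g i parts = parts ++ pyjGroupLoopA s g i [] := by
  induction N with
  | zero =>
      intro i parts hN
      rw [pyjGroupLoopA]
      conv_rhs => rw [pyjGroupLoopA]
      have h : ¬(1 ≤ g ∧ g < i) := by omega
      simp only [dif_neg h]
      simp
  | succ n ih =>
      intro i parts hN
      rw [pyjGroupLoopA]
      conv_rhs => rw [pyjGroupLoopA]
      by_cases h : 1 ≤ g ∧ g < i
      · simp only [dif_pos h]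
        rw [ih (i - g) _ (by omega), ih (i - g) ([] ++ [PySem.List.slice s (some (i - g)) (some i)]) (by omega)]
        simp
      · simp only [dif_neg h]
        simp

lemma pyjRange_eq_nil (a b g : Int) (hg : 1 ≤ g) (hba : b ≤ a) :
    PySem.List.pyRange a b g = [] := by
  rw [PySem.List.pyRange_of_pos _ _ (by omega : (0:Int) < g), if_neg (by omega)]
  simp

lemma pyjRange_step_closed (a g : Int) (hg : 1 ≤ g) (k : Nat) :
    PySem.List.pyRange a (a + (k : Int) * g) g
      = (List.range k).map (fun j : Nat => a + g * (j : Int)) := by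
  rcases Nat.eq_zero_or_pos k with hk | hk
  · subst hk
    simp only [Nat.cast_zero, zero_mul, add_zero, List.range_zero, List.map_nil]
    exact pyjRange_eq_nil a a g hg le_rfl
  · have hab : a < a + (k : Int) * g := by nlinarith
    have hcount : ((a + (k : Int) * g - a + g - 1) / g).toNat = k := by
      have hfl : PySem.Int.floordiv (a + (k : Int) * g - a + g - 1) g = (k : Int) := by
        rw [PySem.Int.floordiv_eq_iff_of_pos (by omega)]
        constructor
        · nlinarith
        · nlinarith
      rw [PySem.Int.floordiv_eq_ediv_of_pos (by omega : (0:Int) < g)] at hfl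
      rw [hfl]; simp
    rw [PySem.List.pyRange_of_pos _ _ (by omega : (0:Int) < g), if_pos hab, hcount]

lemma pyjRange_step_succ (a g : Int) (hg : 1 ≤ g) (k : Nat) :
    PySem.List.pyRange a (a + (k : Int) * g + g) g
      = PySem.List.pyRange a (a + (k : Int) * g) g ++ [a + (k : Int) * g] := by
  have h1 : a + (k : Int) * g + g = a + ((k + 1 : Nat) : Int) * g := by push_cast; ring
  rw [h1, pyjRange_step_closed a g hg (k + 1), pyjRange_step_closed a g hg k,
    List.range_succ, List.map_append]
  simp [mul_comm]

lemma pyjGroupLoopA_reverse (s : List Char) (g head : Int) (hg : 1 ≤ g)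
    (hh0 : 0 < head) (hhg : head ≤ g) : ∀ (k : Nat),
    (pyjGroupLoopA s g (head + (k : Int) * g) []).reverse =
      PySem.List.slice s none (some head) ::
        (PySem.List.pyRange head (head + (k : Int) * g) g).map
          (fun i => PySem.List.slice s (some i) (some (i + g))) := by
  intro k
  induction k with
  | zero =>
      simp only [Nat.cast_zero, zero_mul, add_zero]
      rw [pyjGroupLoopA, dif_neg (by omega)]
      rw [pyjRange_eq_nil head head g hg (le_refl _)]
      simp
  | succ n ih =>
      have hE : head + ((n + 1 : Nat) : Int) * g = head + (n : Int) * g + g := by push_cast; ring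
      rw [hE]
      rw [pyjGroupLoopA, dif_pos ⟨hg, by nlinarith⟩]
      rw [show head + (n : Int) * g + g - g = head + (n : Int) * g by ring]
      rw [pyjGroupLoopA_acc s g (head + (n : Int) * g).toNat _ _ (le_refl _)]
      rw [List.reverse_append, ih]
      rw [pyjRange_step_succ head g hg n, List.map_append]
      simp

-- ===== VERDICT (by name: the statement is the Claim_ definition above) =====
theorem pyj_format_zero_fill_grouped_py_spec : Claim_equal_pyj_format_zero_fill_grouped_py := by
  intro sign prefix_ digits grouping group_size suffix width hdom hpre
  unfold Spec_pyj_format_zero_fill_grouped_py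
  cases grouping with
  | none => rfl
  | some gstr =>
      have hg : 1 ≤ group_size := by
        rcases hpre with h | h
        · exact absurd h (by simp)
        · exact h
      simp only [pyj_format_zero_fill_grouped_py, pyj_format_zero_fill_grouped_py_alt,
        PySem.Str.len_eq]
      have hd_eq := pyjFillLoopA_eq
        ((width - ((sign.toList.length : Int) + (prefix_.toList.length : Int) + (suffix.toList.length : Int)) - (digits.toList.length : Int) + 1).toNat)
        (sign.toList.length : Int) (prefix_.toList.length : Int) (suffix.toList.length : Int)
        group_size width (digits.toList.length : Int) (le_refl _) hg (Int.natCast_nonneg _)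
      rw [hd_eq]
      obtain ⟨D, hD⟩ : ∃ D, max ((digits.toList.length : Int))
          (width - (sign.toList.length : Int) - (prefix_.toList.length : Int) - (suffix.toList.length : Int) -
            PySem.Int.floordiv
              (width - (sign.toList.length : Int) - (prefix_.toList.length : Int) - (suffix.toList.length : Int) - 1)
              (group_size + 1)) = D := ⟨_, rfl⟩
      rw [hD]
      have hDn : (digits.toList.length : Int) ≤ D := hD ▸ le_max_left _ _
      have hD0 : (0 : Int) ≤ D := le_trans (Int.natCast_nonneg _) hDn
      have hpad : (if (digits.toList.length : Int) < D then
            PySem.List.pyRepeat ['0'] (D - (digits.toList.length : Int)) ++ digits.toList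
          else digits.toList)
          = List.replicate (D.toNat - digits.toList.length) '0' ++ digits.toList := by
        by_cases h : (digits.toList.length : Int) < D
        · rw [if_pos h, PySem.List.pyRepeat_singleton]
          congr 2
          omega
        · rw [if_neg h]
          have h0 : D.toNat - digits.toList.length = 0 := by omega
          rw [h0]
          simp
      rw [hpad]
      obtain ⟨padded, hpadded⟩ : ∃ p, List.replicate (D.toNat - digits.toList.length) '0' ++ digits.toList = p := ⟨_, rfl⟩
      rw [hpadded]
      have hplen : ((padded.length : Nat) : Int) = D := by
        rw [← hpadded]
        simp only [List.length_append, List.length_replicate]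
        omega
      simp only [pyjGroupDigitsA]
      rw [hplen]
      have hmain : (pyjGroupLoopA padded group_size D []).reverse =
          PySem.List.slice padded none (some (if D ≠ 0 then PySem.Int.mod (D - 1) group_size + 1 else 0)) ::
            (PySem.List.pyRange (if D ≠ 0 then PySem.Int.mod (D - 1) group_size + 1 else 0) D group_size).map
              (fun i => PySem.List.slice padded (some i) (some (i + group_size))) := by
        rcases eq_or_lt_of_le hD0 with hD0' | hDpos
        · rw [← hD0']
          rw [pyjGroupLoopA, dif_neg (by omega)]
          rw [if_neg (by omega : ¬((0:Int) ≠ 0))]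
          rw [pyjRange_eq_nil 0 0 group_size hg le_rfl]
          simp
        · have hmn := PySem.Int.mod_nonneg (D - 1) (show (0:Int) < group_size by omega)
          have hml := PySem.Int.mod_lt (D - 1) (show (0:Int) < group_size by omega)
          have hq0 : 0 ≤ PySem.Int.floordiv (D - 1) group_size := by
            rw [PySem.Int.le_floordiv_iff_mul_le (by omega)]
            omega
          have hqm := PySem.Int.floordiv_mul_add_mod (D - 1) group_size
          have hdecomp : PySem.Int.mod (D - 1) group_size + 1 +
              (((PySem.Int.floordiv (D - 1) group_size).toNat : Nat) : Int) * group_size = D := by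
            have hc : (((PySem.Int.floordiv (D - 1) group_size).toNat : Nat) : Int)
                = PySem.Int.floordiv (D - 1) group_size := by omega
            rw [hc]
            omega
          have hrev := pyjGroupLoopA_reverse padded group_size
            (PySem.Int.mod (D - 1) group_size + 1) hg (by omega) (by omega)
            (PySem.Int.floordiv (D - 1) group_size).toNat
          rw [hdecomp] at hrev
          rw [hrev, if_pos (by omega : D ≠ 0)]
      rw [hmain]
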